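-- pv_equiv track=rewrite | github.com/mtfehrer/cs476-project | updated2d/constants.py | _build_storage_map
-- ===== SOURCE A (Python) =====
-- def _build_storage_map(shelf_rows: int, shelf_cols: int):
-- 	rows = shelf_rows * 2 + 1
-- 	cols = shelf_cols * 2 + 1
-- 	layout = []
-- 	for r in range(rows):
-- 		row = []
-- 		for c in range(cols):
-- 			if r % 2 == 1 and c % 2 == 1:
-- 				row.append(1)
-- 			else:
-- 				row.append(0)
-- 		layout.append(row)
-- 	return layout
-- ===== SOURCE B (Python) =====
-- def _build_storage_map(shelf_rows: int, shelf_cols: int):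
-- 	rows = shelf_rows * 2 + 1
-- 	cols = shelf_cols * 2 + 1
-- 	grid = [[0] * cols for _ in range(rows)]
-- 	for i in range(1, rows, 2):
-- 		row = grid[i]
-- 		for j in range(1, cols, 2):
-- 			row[j] = 1
-- 	return grid
-- ===== Notes on version B (the rewrite author's own statement) =====
-- stated objective: alternative
-- what changed: B first allocates an all-zero grid and then stamps 1s into the odd-odd cells with step-2 ranges (range(1, rows, 2) x range(1, cols, 2)), replacing A's per-cell parity branch inside nested full-range loops.
import Mathlib
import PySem

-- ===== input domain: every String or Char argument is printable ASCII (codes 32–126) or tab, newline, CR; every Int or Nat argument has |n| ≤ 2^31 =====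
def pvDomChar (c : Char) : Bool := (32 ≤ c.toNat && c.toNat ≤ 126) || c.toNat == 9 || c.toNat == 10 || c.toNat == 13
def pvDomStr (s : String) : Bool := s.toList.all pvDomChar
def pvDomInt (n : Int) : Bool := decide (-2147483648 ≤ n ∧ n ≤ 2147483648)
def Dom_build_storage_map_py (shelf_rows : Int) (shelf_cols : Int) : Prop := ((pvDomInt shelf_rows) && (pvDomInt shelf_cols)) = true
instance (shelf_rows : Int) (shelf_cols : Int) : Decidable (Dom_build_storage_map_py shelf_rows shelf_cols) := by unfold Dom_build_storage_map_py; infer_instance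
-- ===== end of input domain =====

-- B builds an all-zero grid and then stamps 1s at the odd-odd cells with step-2 ranges (no per-cell
-- parity branch); alternative decomposition, same values on every input.

-- ===== PORT A =====
def build_storage_map_py (shelf_rows : Int) (shelf_cols : Int) : List (List Int) :=
  let rows := shelf_rows * 2 + 1
  let cols := shelf_cols * 2 + 1
  (PySem.List.pyRange 0 rows 1).foldl (fun layout r =>
    layout ++ [(PySem.List.pyRange 0 cols 1).foldl (fun row c =>
      if PySem.Int.mod r 2 = 1 ∧ PySem.Int.mod c 2 = 1 then row ++ [(1 : Int)] else row ++ [(0 : Int)]) []]) []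

-- ===== PORT B =====
-- `row = grid[i]` aliases the i-th row and `row[j] = 1` mutates it in place; the port reads the row
-- (plain index: 1 ≤ i < rows, so getD's default is never used) and writes the stamped row back with
-- List.set — exact, since the inner loop touches no other part of grid.
def build_storage_map_py_alt (shelf_rows : Int) (shelf_cols : Int) : List (List Int) :=
  let rows := shelf_rows * 2 + 1
  let cols := shelf_cols * 2 + 1
  let grid := (PySem.List.pyRange 0 rows 1).map (fun _ => PySem.List.pyRepeat [0] cols)
  (PySem.List.pyRange 1 rows 2).foldl (fun g i =>
    let row := g.getD i.toNat []
    g.set i.toNat ((PySem.List.pyRange 1 cols 2).foldl (fun row j => row.set j.toNat (1 : Int)) row)) grid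

-- ===== PRECONDITION & SPEC =====
def Spec_build_storage_map_py (shelf_rows : Int) (shelf_cols : Int) (out : List (List Int)) : Prop := out = build_storage_map_py_alt shelf_rows shelf_cols
instance (shelf_rows : Int) (shelf_cols : Int) (out : List (List Int)) : Decidable (Spec_build_storage_map_py shelf_rows shelf_cols out) := by unfold Spec_build_storage_map_py; infer_instance

-- ===== CLAIM (what is proved, stated in full; the proofs are below) =====
def Claim_equal_build_storage_map_py : Prop := ∀ (shelf_rows : Int) (shelf_cols : Int), Dom_build_storage_map_py shelf_rows shelf_cols → Spec_build_storage_map_py shelf_rows shelf_cols (build_storage_map_py shelf_rows shelf_cols)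

-- ===== LEMMAS AND PROOFS =====

-- A in map normal form: row r of the layout is the indicator map over the column range.
theorem portA_eq_map (shelf_rows shelf_cols : Int) :
    build_storage_map_py shelf_rows shelf_cols
    = (PySem.List.pyRange 0 (shelf_rows * 2 + 1) 1).map (fun r =>
        (PySem.List.pyRange 0 (shelf_cols * 2 + 1) 1).map (fun c =>
          if PySem.Int.mod r 2 = 1 ∧ PySem.Int.mod c 2 = 1 then (1 : Int) else 0)) := by
  unfold build_storage_map_py
  simp only []
  rw [PySem.List.foldl_append_singleton_eq_map, List.nil_append]
  apply List.map_congr_left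
  intro r _
  rw [show (fun (row : List Int) c =>
      if PySem.Int.mod r 2 = 1 ∧ PySem.Int.mod c 2 = 1 then row ++ [(1 : Int)] else row ++ [(0 : Int)])
      = (fun (row : List Int) c =>
        row ++ [if PySem.Int.mod r 2 = 1 ∧ PySem.Int.mod c 2 = 1 then (1 : Int) else 0]) by
    funext row c; split <;> rfl]
  rw [PySem.List.foldl_append_singleton_eq_map, List.nil_append]

-- Stamping 1 at the positions js of a row, read through getElem?.
theorem stamp_get (js : List Int) : ∀ (row : List Int),
    (∀ j ∈ js, j.toNat < row.length) → ∀ k : Nat,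
    (js.foldl (fun row j => row.set j.toNat (1 : Int)) row)[k]? =
      if ∃ j ∈ js, j.toNat = k then some 1 else row[k]? := by
  induction js with
  | nil => intro row _ k; simp
  | cons j js ih =>
    intro row h k
    rw [List.foldl_cons, ih (row.set j.toNat 1)
      (by intro j' hj'; simpa using h j' (List.mem_cons_of_mem _ hj')) k]
    by_cases hk : ∃ j' ∈ js, j'.toNat = k
    · have hc : ∃ j' ∈ j :: js, j'.toNat = k := by
        obtain ⟨j', hj', e⟩ := hk; exact ⟨j', List.mem_cons_of_mem _ hj', e⟩
      rw [if_pos hk, if_pos hc]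
    · by_cases he : j.toNat = k
      · have hlt : j.toNat < row.length := h j List.mem_cons_self
        have hc : ∃ j' ∈ j :: js, j'.toNat = k := ⟨j, List.mem_cons_self, he⟩
        rw [if_neg hk, if_pos hc, List.getElem?_set, if_pos he, if_pos hlt]
      · have hc : ¬ ∃ j' ∈ j :: js, j'.toNat = k := by
          rintro ⟨j', hj', e⟩
          rcases List.mem_cons.1 hj' with rfl | hj'
          · exact he e
          · exact hk ⟨j', hj', e⟩
        rw [if_neg hk, if_neg hc, List.getElem?_set, if_neg he]

-- Replacing row i by f(row i) at the distinct positions is of a grid, read through getElem?.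
theorem grid_get (f : List Int → List Int) (is : List Int) : ∀ (g : List (List Int)),
    (∀ i ∈ is, 0 ≤ i ∧ i.toNat < g.length) → (is.map Int.toNat).Nodup → ∀ k : Nat,
    (is.foldl (fun g i => g.set i.toNat (f (g.getD i.toNat []))) g)[k]? =
      if ∃ i ∈ is, i.toNat = k then g[k]?.map f else g[k]? := by
  induction is with
  | nil => intro g _ _ k; simp
  | cons i is ih =>
    intro g h hnd k
    have hnd' : i.toNat ∉ is.map Int.toNat ∧ (is.map Int.toNat).Nodup := by
      rw [List.map_cons, List.nodup_cons] at hnd; exact hnd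
    have hlen : (g.set i.toNat (f (g.getD i.toNat []))).length = g.length := by simp
    rw [List.foldl_cons, ih (g.set i.toNat (f (g.getD i.toNat [])))
      (by intro i' hi'; rw [hlen]; exact h i' (List.mem_cons_of_mem _ hi')) hnd'.2 k]
    by_cases hk : ∃ i' ∈ is, i'.toNat = k
    · have hne : ¬ (i.toNat = k) := by
        obtain ⟨i', hi', e⟩ := hk
        intro e'
        exact hnd'.1 (by simpa [e', ← e] using List.mem_map_of_mem (f := Int.toNat) hi')
      have hc : ∃ i' ∈ i :: is, i'.toNat = k := by
        obtain ⟨i', hi', e⟩ := hk; exact ⟨i', List.mem_cons_of_mem _ hi', e⟩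
      rw [if_pos hk, if_pos hc, List.getElem?_set, if_neg hne]
    · by_cases he : i.toNat = k
      · have hlt : i.toNat < g.length := (h i List.mem_cons_self).2
        have hsome : g[k]? = some (g.getD k []) := by
          rw [List.getD_eq_getElem?_getD, List.getElem?_eq_getElem (he ▸ hlt)]; rfl
        have hc : ∃ i' ∈ i :: is, i'.toNat = k := ⟨i, List.mem_cons_self, he⟩
        rw [if_neg hk, if_pos hc, List.getElem?_set, if_pos he, if_pos (by omega), hsome]
        simp [he]
      · have hc : ¬ ∃ i' ∈ i :: is, i'.toNat = k := by
          rintro ⟨i', hi', e⟩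
          rcases List.mem_cons.1 hi' with rfl | hi'
          · exact he e
          · exact hk ⟨i', hi', e⟩
        rw [if_neg hk, if_neg hc, List.getElem?_set, if_neg he]

-- Membership of an index k (as a Nat) in the step-2 range starting at 1.
theorem exists_pyRange_two (m : Int) (k : Nat) :
    (∃ i ∈ PySem.List.pyRange 1 m 2, i.toNat = k) ↔ (1 ≤ (k : Int) ∧ (k : Int) < m ∧ (2 : Int) ∣ (k : Int) - 1) := by
  constructor
  · rintro ⟨i, hi, rfl⟩
    obtain ⟨h1, h2, h3⟩ := (PySem.List.mem_pyRange_iff_of_pos (by norm_num) i).1 hi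
    have : (i.toNat : Int) = i := Int.toNat_of_nonneg (by omega)
    rw [this]; exact ⟨h1, h2, h3⟩
  · rintro ⟨h1, h2, h3⟩
    exact ⟨(k : Int), (PySem.List.mem_pyRange_iff_of_pos (by norm_num) _).2 ⟨h1, h2, h3⟩, by omega⟩

theorem nodup_pyRange_two_toNat (m : Int) : ((PySem.List.pyRange 1 m 2).map Int.toNat).Nodup := by
  rw [PySem.List.pyRange_of_pos _ _ (by norm_num), List.map_map]
  exact List.Nodup.map (fun a b h => by simp only [Function.comp] at h; omega) (List.nodup_range)

-- The stamped zero row equals A's indicator row, for odd r.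
theorem odd_row_eq (cols : Int) (r : Int) (hr : PySem.Int.mod r 2 = 1) :
    (PySem.List.pyRange 0 cols 1).map (fun c =>
        if PySem.Int.mod r 2 = 1 ∧ PySem.Int.mod c 2 = 1 then (1 : Int) else 0)
    = (PySem.List.pyRange 1 cols 2).foldl (fun row j => row.set j.toNat (1 : Int))
        (List.replicate cols.toNat (0 : Int)) := by
  apply List.ext_getElem?
  intro k
  rw [stamp_get _ _ (by
    intro j hj
    obtain ⟨h1, h2, _⟩ := (PySem.List.mem_pyRange_iff_of_pos (by norm_num) j).1 hj
    simp only [List.length_replicate]; omega) k]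
  simp only [exists_pyRange_two]
  rw [List.getElem?_map, PySem.List.getElem?_pyRange_one, List.getElem?_replicate]
  have hmod : PySem.Int.mod ((0 : Int) + (k : Nat)) 2 = (k : Int) % 2 := by
    rw [show ((0 : Int) + (k : Nat)) = (k : Int) by omega]
    exact PySem.Int.mod_eq_emod_of_pos (by omega)
  by_cases hk : k < cols.toNat
  · rw [if_pos (by omega : k < (cols - 0).toNat), if_pos hk, Option.map_some]
    by_cases hodd : (2 : Int) ∣ (k : Int) - 1
    · rw [if_pos (show (1 : Int) ≤ (k : Int) ∧ (k : Int) < cols ∧ (2 : Int) ∣ (k : Int) - 1 from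
        ⟨by omega, by omega, hodd⟩)]
      rw [if_pos (show PySem.Int.mod r 2 = 1 ∧ PySem.Int.mod ((0 : Int) + (k : Nat)) 2 = 1 from
        ⟨hr, by rw [hmod]; omega⟩)]
    · rw [if_neg (show ¬ ((1 : Int) ≤ (k : Int) ∧ (k : Int) < cols ∧ (2 : Int) ∣ (k : Int) - 1) from
        by rintro ⟨_, _, hd⟩; exact hodd hd)]
      rw [if_neg (show ¬ (PySem.Int.mod r 2 = 1 ∧ PySem.Int.mod ((0 : Int) + (k : Nat)) 2 = 1) from
        by rintro ⟨_, hm⟩; rw [hmod] at hm; omega)]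
  · rw [if_neg (by omega : ¬ k < (cols - 0).toNat), if_neg hk, Option.map_none,
      if_neg (by rintro ⟨_, h2, _⟩; omega)]

-- ===== VERDICT (by name: the statement is the Claim_ definition above) =====
theorem build_storage_map_py_spec : Claim_equal_build_storage_map_py := by
  intro shelf_rows shelf_cols _
  unfold Spec_build_storage_map_py build_storage_map_py_alt
  simp only []
  rw [portA_eq_map, PySem.List.pyRepeat_singleton]
  set rows := shelf_rows * 2 + 1 with hrows
  set cols := shelf_cols * 2 + 1 with hcols
  apply List.ext_getElem?
  intro k
  have hgg := grid_get (fun row => (PySem.List.pyRange 1 cols 2).foldl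
      (fun row j => row.set j.toNat (1 : Int)) row)
    (PySem.List.pyRange 1 rows 2)
    ((PySem.List.pyRange 0 rows 1).map (fun _ => List.replicate cols.toNat (0 : Int)))
    (by
      intro i hi
      obtain ⟨h1, h2, _⟩ := (PySem.List.mem_pyRange_iff_of_pos (by norm_num) i).1 hi
      constructor
      · omega
      · simp only [List.length_map, PySem.List.length_pyRange_one]; omega)
    (nodup_pyRange_two_toNat rows) k
  simp only [] at hgg
  rw [hgg]
  simp only [exists_pyRange_two]
  rw [List.getElem?_map, List.getElem?_map, PySem.List.getElem?_pyRange_one]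
  have hmod : PySem.Int.mod ((0 : Int) + (k : Nat)) 2 = (k : Int) % 2 := by
    rw [show ((0 : Int) + (k : Nat)) = (k : Int) by omega]
    exact PySem.Int.mod_eq_emod_of_pos (by omega)
  by_cases hk : k < (rows - 0).toNat
  · rw [if_pos hk]
    simp only [Option.map_some]
    by_cases hodd : (2 : Int) ∣ (k : Int) - 1
    · rw [if_pos ⟨by omega, by omega, hodd⟩]
      exact congrArg some (odd_row_eq cols _ (by rw [hmod]; omega))
    · rw [if_neg (by rintro ⟨_, _, hd⟩; exact hodd hd)]
      refine congrArg some ?_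
      rw [show (fun c => if PySem.Int.mod ((0 : Int) + (k : Nat)) 2 = 1 ∧ PySem.Int.mod c 2 = 1
            then (1 : Int) else 0)
          = (fun (_ : Int) => (0 : Int)) by
        funext c; rw [if_neg (by rintro ⟨hm, _⟩; rw [hmod] at hm; omega)]]
      simp [List.map_const', PySem.List.length_pyRange_one]
  · rw [if_neg hk]
    simp only [Option.map_none]
    rw [if_neg (by rintro ⟨_, h2, _⟩; omega)]
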